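-- pv_equiv track=rewrite | github.com/um-computacion-tm/scrabble-2023-lgsosa | game/several.py | converter_locations_to_positions
-- ===== SOURCE A (Python) =====
-- def converter_locations_to_positions(word, location, orientation):
--     positions = []
--     column = location[0]
--     row = location[1]
--     for _ in word:
--         positions.append((column, row))
--         if orientation == "H":
--             row += 1
--         elif orientation == "V":
--             column += 1
--     return positions
-- ===== SOURCE B (Python) =====
-- def converter_locations_to_positions(word, location, orientation):
--     n = len(word)
--     column, row = location
--     if orientation == "H":
--         return [(column, row + i) for i in range(n)]
--     if orientation == "V":
--         return [(column + i, row) for i in range(n)]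
--     return [(column, row)] * n
-- ===== Notes on version B (the rewrite author's own statement) =====
-- stated objective: simpler
-- what changed: Hoists the orientation test out of the loop and replaces accumulator-threaded row/column increments with closed-form offset comprehensions over range(len(word)) (repeat for the non-H/V case).
import Mathlib
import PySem

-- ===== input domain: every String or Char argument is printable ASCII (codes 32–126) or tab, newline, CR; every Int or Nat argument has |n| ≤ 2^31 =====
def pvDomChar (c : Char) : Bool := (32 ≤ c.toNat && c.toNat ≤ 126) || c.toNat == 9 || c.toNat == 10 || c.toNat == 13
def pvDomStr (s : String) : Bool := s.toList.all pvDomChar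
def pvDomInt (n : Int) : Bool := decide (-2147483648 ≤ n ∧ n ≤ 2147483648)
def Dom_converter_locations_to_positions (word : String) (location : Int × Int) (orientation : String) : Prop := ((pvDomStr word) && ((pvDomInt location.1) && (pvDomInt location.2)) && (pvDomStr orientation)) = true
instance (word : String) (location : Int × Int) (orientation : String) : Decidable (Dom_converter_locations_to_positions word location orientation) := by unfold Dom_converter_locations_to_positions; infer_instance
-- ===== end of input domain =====

-- B hoists the orientation test out of the loop and uses closed-form offsets over an index range instead of threading row/column through an accumulator (simpler decomposition; same cost).


-- ===== PORT A =====
-- loop over the characters of word, threading (positions, column, row) through the fold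
def converter_locations_to_positions (word : String) (location : Int × Int) (orientation : String) : List (Int × Int) :=
  (word.toList.foldl
    (fun (st : List (Int × Int) × Int × Int) _ =>
      let positions := st.1 ++ [(st.2.1, st.2.2)]
      if orientation = "H" then (positions, st.2.1, st.2.2 + 1)
      else if orientation = "V" then (positions, st.2.1 + 1, st.2.2)
      else (positions, st.2.1, st.2.2))
    ([], location.1, location.2)).1

-- ===== PORT B =====
def converter_locations_to_positions_alt (word : String) (location : Int × Int) (orientation : String) : List (Int × Int) :=
  let n := word.toList.length
  if orientation = "H" then
    (List.range n).map (fun (i : Nat) => (location.1, location.2 + (i : Int)))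
  else if orientation = "V" then
    (List.range n).map (fun (i : Nat) => (location.1 + (i : Int), location.2))
  else
    List.replicate n (location.1, location.2)

-- ===== PRECONDITION & SPEC =====
def Spec_converter_locations_to_positions (word : String) (location : Int × Int) (orientation : String) (out : List (Int × Int)) : Prop := out = converter_locations_to_positions_alt word location orientation
instance (word : String) (location : Int × Int) (orientation : String) (out : List (Int × Int)) : Decidable (Spec_converter_locations_to_positions word location orientation out) := by unfold Spec_converter_locations_to_positions; infer_instance

-- ===== CLAIM (what is proved, stated in full; the proofs are below) =====
def Claim_equal_converter_locations_to_positions : Prop := ∀ (word : String) (location : Int × Int) (orientation : String), Dom_converter_locations_to_positions word location orientation → Spec_converter_locations_to_positions word location orientation (converter_locations_to_positions word location orientation)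

-- ===== LEMMAS AND PROOFS =====

theorem loopH (cs : List Char) (ps : List (Int × Int)) (c r : Int) :
    (cs.foldl (fun (st : List (Int × Int) × Int × Int) _ =>
        (st.1 ++ [(st.2.1, st.2.2)], st.2.1, st.2.2 + 1)) (ps, c, r)).1
      = ps ++ (List.range cs.length).map (fun (i : Nat) => (c, r + (i : Int))) := by
  induction cs generalizing ps r with
  | nil => simp
  | cons x xs ih =>
    rw [List.foldl_cons, ih, List.length_cons, List.range_succ_eq_map]
    simp only [List.map_cons, List.map_map, Function.comp_def, List.append_assoc, List.singleton_append]
    congr 1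
    simp
    intro a _
    ring

theorem loopV (cs : List Char) (ps : List (Int × Int)) (c r : Int) :
    (cs.foldl (fun (st : List (Int × Int) × Int × Int) _ =>
        (st.1 ++ [(st.2.1, st.2.2)], st.2.1 + 1, st.2.2)) (ps, c, r)).1
      = ps ++ (List.range cs.length).map (fun (i : Nat) => (c + (i : Int), r)) := by
  induction cs generalizing ps c with
  | nil => simp
  | cons x xs ih =>
    rw [List.foldl_cons, ih, List.length_cons, List.range_succ_eq_map]
    simp only [List.map_cons, List.map_map, Function.comp_def, List.append_assoc, List.singleton_append]
    congr 1
    simp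
    intro a _
    ring

theorem loopO (cs : List Char) (ps : List (Int × Int)) (c r : Int) :
    (cs.foldl (fun (st : List (Int × Int) × Int × Int) _ =>
        (st.1 ++ [(st.2.1, st.2.2)], st.2.1, st.2.2)) (ps, c, r)).1
      = ps ++ List.replicate cs.length (c, r) := by
  induction cs generalizing ps with
  | nil => simp
  | cons x xs ih =>
    rw [List.foldl_cons, ih]
    simp [List.replicate_succ]

-- ===== VERDICT (by name: the statement is the Claim_ definition above) =====
theorem converter_locations_to_positions_spec : Claim_equal_converter_locations_to_positions := by
  intro word location orientation _
  unfold Spec_converter_locations_to_positions converter_locations_to_positions converter_locations_to_positions_alt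
  by_cases hH : orientation = "H"
  · subst hH
    simp only [reduceIte]
    rw [loopH]
    simp
  · by_cases hV : orientation = "V"
    · subst hV
      simp only [if_neg hH, reduceIte]
      rw [loopV]
      simp
    · simp only [if_neg hH, if_neg hV]
      rw [loopO]
      simp
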